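-- pv_equiv track=rewrite | github.com/mandus/adventofcode | 2023/14/14.py | move_left
-- ===== SOURCE A (Python) =====
-- def idx(li: list, c: chr) -> list:
--     return [i for i, x in enumerate(li) if x == c]
--
-- def move_left(c: list) -> list:
--     r = idx(c, 'O')
--     s = idx(c, '#')
--     sz = len(c)
--     ret = []
--     for i in s:
--         t = [x for x in r if x < i]
--         ret.extend(['O' for _ in t])
--         cur = len(ret)
--         while cur < i:
--             ret.append('.')
--             cur = len(ret)
--         ret.append('#')
--         for x in t:
--             r.remove(x)
--     ret.extend(['O' for _ in r])
--     cur = len(ret)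
--     while cur < sz:
--         ret.append('.')
--         cur = len(ret)
--     return ret
-- ===== SOURCE B (Python) =====
-- def move_left(c: list) -> list:
--     ret = []
--     cnt = 0
--     seg = 0
--     for x in c:
--         if x == '#':
--             ret += ['O'] * cnt + ['.'] * (seg - cnt) + ['#']
--             cnt = 0
--             seg = 0
--         else:
--             seg += 1
--             if x == 'O':
--                 cnt += 1
--     ret += ['O'] * cnt + ['.'] * (seg - cnt)
--     return ret
-- ===== Notes on version B (the rewrite author's own statement) =====
-- stated objective: faster
-- what changed: Replaces the index-list machinery (enumerate both symbol positions, per-barrier filter + list.remove + while-padding) with a single left-to-right pass that counts 'O's and segment length per '#'-delimited segment and emits packed 'O's, dots and the barrier.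
import Mathlib
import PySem

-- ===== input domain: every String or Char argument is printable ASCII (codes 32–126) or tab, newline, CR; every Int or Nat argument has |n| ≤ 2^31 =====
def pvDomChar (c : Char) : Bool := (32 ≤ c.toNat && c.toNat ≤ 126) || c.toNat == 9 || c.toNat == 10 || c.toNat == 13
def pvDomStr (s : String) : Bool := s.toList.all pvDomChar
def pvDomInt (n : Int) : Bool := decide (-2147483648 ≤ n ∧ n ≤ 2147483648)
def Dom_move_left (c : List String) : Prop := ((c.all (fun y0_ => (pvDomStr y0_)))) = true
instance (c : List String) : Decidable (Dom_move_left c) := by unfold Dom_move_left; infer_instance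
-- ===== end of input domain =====

-- B rolls the rocks in one linear pass (count 'O's per '#'-segment); A scans the index
-- lists per barrier. Proved: identical return value on every input (A does not mutate c).

-- ===== PORT A =====
-- idx(li, c) = [i for i, x in enumerate(li) if x == c]
def pvIdx (li : List String) (ch : String) : List Int :=
  ((PySem.List.enumerate li).filter (fun p => p.2 == ch)).map (fun p => p.1)

-- the 'while cur < i: ret.append('.')' loops of A
def pvPad (ret : List String) (i : Int) : List String :=
  if (ret.length : Int) < i then pvPad (ret ++ ["."]) i else ret
termination_by (i - ret.length).toNat
decreasing_by simp; omega

-- one iteration of A's 'for i in s' loop; state (r, ret)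
def pvStep (st : List Int × List String) (i : Int) : List Int × List String :=
  let t := st.1.filter (fun x => decide (x < i))
  let ret := st.2 ++ t.map (fun _ => "O")
  let ret := pvPad ret i
  let ret := ret ++ ["#"]
  let r := t.foldl (fun r x => (PySem.List.remove? r x).getD r) st.1
  (r, ret)

def move_left (c : List String) : List String :=
  let r := pvIdx c "O"
  let s := pvIdx c "#"
  let sz := c.length
  let st := s.foldl pvStep (r, [])
  let ret := st.2 ++ st.1.map (fun _ => "O")
  pvPad ret (sz : Int)

-- ===== PORT B =====
-- state (ret, cnt, seg): output so far, 'O'-count and length of the current segment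
def pvSegB (st : List String × Nat × Nat) (x : String) : List String × Nat × Nat :=
  if x == "#" then
    (st.1 ++ List.replicate st.2.1 "O" ++ List.replicate (st.2.2 - st.2.1) "." ++ ["#"], 0, 0)
  else
    (st.1, (if x == "O" then st.2.1 + 1 else st.2.1), st.2.2 + 1)

def move_left_alt (c : List String) : List String :=
  let st := c.foldl pvSegB ([], 0, 0)
  st.1 ++ List.replicate st.2.1 "O" ++ List.replicate (st.2.2 - st.2.1) "."

-- ===== PRECONDITION & SPEC =====
def Spec_move_left (c : List String) (out : List String) : Prop := out = move_left_alt c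
instance (c : List String) (out : List String) : Decidable (Spec_move_left c out) := by unfold Spec_move_left; infer_instance

-- ===== CLAIM (what is proved, stated in full; the proofs are below) =====
def Claim_equal_move_left : Prop := ∀ (c : List String), Dom_move_left c → Spec_move_left c (move_left c)

-- ===== LEMMAS AND PROOFS =====

-- number of 'O' entries in a segment
def pvCntO (l : List String) : Nat := l.countP (fun x => x == "O")

theorem pvPad_eq (ret : List String) (i : Int) :
    pvPad ret i = ret ++ List.replicate (i - (ret.length : Int)).toNat "." := by
  fun_induction pvPad ret i with
  | case1 a b c =>
      rw [c]
      have h1 : (i - ((a.length : Nat) : Int)).toNat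
          = (i - (((a ++ ["."]).length : Nat) : Int)).toNat + 1 := by simp; omega
      rw [h1, List.replicate_succ]
      simp
  | case2 a b =>
      have h1 : (i - ((a.length : Nat) : Int)).toNat = 0 := by omega
      simp [h1]

def pvIdxS (li : List String) (ch : String) (s : Int) : List Int :=
  ((PySem.List.enumerate li s).filter (fun p => p.2 == ch)).map (fun p => p.1)

theorem pvIdxS_shift (li : List String) (ch : String) :
    ∀ s : Int, pvIdxS li ch s = (pvIdxS li ch 0).map (· + s) := by
  induction li with
  | nil => intro s; simp [pvIdxS, PySem.List.enumerate_nil]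
  | cons a li ih =>
      intro s
      simp only [pvIdxS, PySem.List.enumerate_cons, List.filter_cons]
      cases h : (a == ch) <;>
        simp only [h, if_pos, if_neg, Bool.false_eq_true, not_false_iff, List.map_cons] <;>
        · rw [show ((PySem.List.enumerate li (s+1)).filter (fun p => p.2 == ch)).map (fun p => p.1)
                = pvIdxS li ch (s+1) from rfl,
             show ((PySem.List.enumerate li (0+1)).filter (fun p => p.2 == ch)).map (fun p => p.1)
                = pvIdxS li ch (0+1) from rfl, ih (s+1), ih (0+1)]
          simp [List.map_map]
          intro x _; omega

theorem pvIdx_eq_pvIdxS (li : List String) (ch : String) : pvIdx li ch = pvIdxS li ch 0 := rfl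

theorem pvIdx_nil (ch : String) : pvIdx [] ch = [] := by
  simp [pvIdx, PySem.List.enumerate_nil]

theorem pvIdx_cons (a : String) (li : List String) (ch : String) :
    pvIdx (a :: li) ch
      = (if a == ch then [(0 : Int)] else []) ++ (pvIdx li ch).map (· + 1) := by
  rw [pvIdx_eq_pvIdxS]
  simp only [pvIdxS, PySem.List.enumerate_cons, List.filter_cons]
  cases h : (a == ch) <;>
    simp only [h, if_pos, if_neg, Bool.false_eq_true, not_false_iff, List.map_cons] <;>
    · rw [show ((PySem.List.enumerate li (0+1)).filter (fun p => p.2 == ch)).map (fun p => p.1)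
            = pvIdxS li ch (0+1) from rfl, pvIdxS_shift li ch (0+1)]
      simp [pvIdx_eq_pvIdxS]

theorem pvIdx_append (l1 l2 : List String) (ch : String) :
    pvIdx (l1 ++ l2) ch = pvIdx l1 ch ++ (pvIdx l2 ch).map (· + (l1.length : Int)) := by
  induction l1 with
  | nil => simp [pvIdx_nil]
  | cons a l1 ih =>
      simp only [List.cons_append, pvIdx_cons, ih, List.map_append, List.map_map,
        List.append_assoc, List.length_cons]
      congr 2
      apply List.map_congr_left
      intro x _
      simp; push_cast; ring

theorem pvIdx_bound (li : List String) (ch : String) :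
    ∀ x ∈ pvIdx li ch, 0 ≤ x ∧ x < li.length := by
  induction li with
  | nil => simp [pvIdx_nil]
  | cons a li ih =>
      intro x hx
      rw [pvIdx_cons] at hx
      simp only [List.mem_append, List.mem_map] at hx
      rcases hx with hx | ⟨y, hy, rfl⟩
      · cases h : (a == ch) with
        | false => simp [h] at hx
        | true => simp [h] at hx; subst hx; simp
      · have := ih y hy
        simp only [List.length_cons]
        push_cast
        omega

theorem pvIdx_len (li : List String) (ch : String) :
    (pvIdx li ch).length = li.countP (fun x => x == ch) := by
  induction li with
  | nil => simp [pvIdx_nil]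
  | cons a li ih =>
      rw [pvIdx_cons]
      simp only [List.length_append, List.length_map, ih, List.countP_cons]
      cases h : (a == ch) <;> simp [h] <;> omega

theorem pvIdx_nil_of_not_mem (li : List String) (ch : String) (h : ch ∉ li) :
    pvIdx li ch = [] := by
  induction li with
  | nil => exact pvIdx_nil ch
  | cons a li ih =>
      simp only [List.mem_cons, not_or] at h
      have ha : (a == ch) = false := by
        simp only [beq_eq_false_iff_ne, ne_eq]
        exact fun hh => h.1 hh.symm
      rw [pvIdx_cons, ih h.2]
      simp [ha]

theorem remove_prefix (t : List Int) :
    ∀ l2 : List Int,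
      t.foldl (fun r x => (PySem.List.remove? r x).getD r) (t ++ l2) = l2 := by
  induction t with
  | nil => intro l2; rfl
  | cons x t ih =>
      intro l2
      simp only [List.cons_append, List.foldl_cons, PySem.List.remove?_cons_self,
        Option.getD_some]
      exact ih l2

theorem remove?_map (f : Int → Int) (hf : Function.Injective f) (l : List Int) (x : Int) :
    PySem.List.remove? (l.map f) (f x) = (PySem.List.remove? l x).map (List.map f) := by
  induction l with
  | nil =>
      have h1 : PySem.List.remove? ([] : List Int) x = none := by
        rw [PySem.List.remove?_eq_none_iff]; simp
      have h2 : PySem.List.remove? (([] : List Int).map f) (f x) = none := by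
        rw [PySem.List.remove?_eq_none_iff]; simp
      rw [h1, h2]; rfl
  | cons a l ih =>
      by_cases ha : a = x
      · subst ha
        simp [PySem.List.remove?_cons_self]
      · have hfa : f a ≠ f x := fun hh => ha (hf hh)
        rw [List.map_cons, PySem.List.remove?_cons_of_ne _ hfa,
          PySem.List.remove?_cons_of_ne _ ha, ih]
        cases PySem.List.remove? l x <;> simp

theorem foldRemove_map (f : Int → Int) (hf : Function.Injective f) (t : List Int) :
    ∀ r : List Int,
      (t.map f).foldl (fun r x => (PySem.List.remove? r x).getD r) (r.map f)
        = (t.foldl (fun r x => (PySem.List.remove? r x).getD r) r).map f := by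
  induction t with
  | nil => intro r; rfl
  | cons x t ih =>
      intro r
      simp only [List.map_cons, List.foldl_cons, remove?_map f hf]
      cases h : PySem.List.remove? r x <;> simp [h] <;> apply ih

theorem pvStep_shift (m : Int) (r : List Int) (ret0 ret : List String)
    (h0 : (ret0.length : Int) = m) (i : Int) :
    pvStep (r.map (· + m), ret0 ++ ret) (i + m)
      = ((pvStep (r, ret) i).1.map (· + m), ret0 ++ (pvStep (r, ret) i).2) := by
  have hinj : Function.Injective (fun x : Int => x + m) := fun a b h => by
    simpa using h
  have hfilter : (r.map (· + m)).filter (fun x => decide (x < i + m))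
      = (r.filter (fun x => decide (x < i))).map (· + m) := by
    rw [List.filter_map]
    congr 1
    apply List.filter_congr
    intro x _
    simp only [Function.comp]
    by_cases h : x < i <;> simp [h] <;> omega
  set t := r.filter (fun x => decide (x < i)) with ht
  simp only [pvStep, hfilter]
  have hO : (t.map (· + m)).map (fun _ => "O") = t.map (fun _ => "O") := by
    rw [List.map_map]
    exact List.map_congr_left (fun x _ => rfl)
  have hpad : pvPad (ret0 ++ ret ++ (t.map (· + m)).map (fun _ => "O")) (i + m)
      = ret0 ++ pvPad (ret ++ t.map (fun _ => "O")) i := by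
    rw [hO, pvPad_eq, pvPad_eq]
    have hexp : (i + m - (((ret0 ++ ret ++ t.map (fun _ => "O")).length : Nat) : Int)).toNat
        = (i - (((ret ++ t.map (fun _ => "O")).length : Nat) : Int)).toNat := by
      simp only [List.length_append, List.length_map]
      push_cast
      omega
    rw [List.append_assoc, hexp]
    simp [List.append_assoc]
  rw [hpad, foldRemove_map _ hinj]
  simp [List.append_assoc]
  exact ⟨rfl, rfl⟩

theorem foldl_step_shift (m : Int) (s : List Int) :
    ∀ (r : List Int) (ret0 ret : List String), (ret0.length : Int) = m →
      (s.map (· + m)).foldl pvStep (r.map (· + m), ret0 ++ ret)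
        = ((s.foldl pvStep (r, ret)).1.map (· + m),
           ret0 ++ (s.foldl pvStep (r, ret)).2) := by
  induction s with
  | nil => intro r ret0 ret h0; rfl
  | cons i s ih =>
      intro r ret0 ret h0
      simp only [List.map_cons, List.foldl_cons, pvStep_shift m r ret0 ret h0 i]
      exact ih (pvStep (r, ret) i).1 ret0 (pvStep (r, ret) i).2 h0

theorem map_const_O (l : List Int) :
    l.map (fun _ => "O") = List.replicate l.length "O" := by
  simp [List.eq_replicate_iff]

-- A on a '#'-free list
theorem A_nohash (c : List String) (h : "#" ∉ c) :
    move_left c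
      = List.replicate (pvCntO c) "O" ++ List.replicate (c.length - pvCntO c) "." := by
  have hcnt : (pvIdx c "O").length = pvCntO c := pvIdx_len c "O"
  have hle : pvCntO c ≤ c.length := List.countP_le_length
  simp only [move_left, pvIdx_nil_of_not_mem c "#" h, List.foldl_nil, List.nil_append,
    map_const_O, pvPad_eq, hcnt]
  congr 1
  simp only [List.length_replicate]
  congr 1
  omega

-- A peels the first segment
theorem A_split (pre post : List String) (h : "#" ∉ pre) :
    move_left (pre ++ "#" :: post)
      = List.replicate (pvCntO pre) "O" ++ List.replicate (pre.length - pvCntO pre) "."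
        ++ ["#"] ++ move_left post := by
  have hO : pvIdx (pre ++ "#" :: post) "O"
      = pvIdx pre "O" ++ (pvIdx post "O").map (· + ((pre.length : Int) + 1)) := by
    rw [pvIdx_append, pvIdx_cons]
    have hno : (("#" : String) == "O") = false := by decide
    simp only [hno, Bool.false_eq_true, if_neg, not_false_iff, ite_false, List.nil_append,
      List.map_map]
    congr 1
    apply List.map_congr_left
    intro x _
    simp
    omega
  have hS : pvIdx (pre ++ "#" :: post) "#"
      = (pre.length : Int) :: (pvIdx post "#").map (· + ((pre.length : Int) + 1)) := by
    rw [pvIdx_append, pvIdx_cons, pvIdx_nil_of_not_mem pre _ h]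
    have hyes : (("#" : String) == "#") = true := by decide
    simp only [hyes, ite_true, List.nil_append, List.map_append, List.map_cons, List.map_map,
      List.cons_append]
    congr 1
    · omega
    · apply List.map_congr_left
      intro x _
      simp
      omega
  have hbpre := pvIdx_bound pre "O"
  have hbpost := pvIdx_bound post "O"
  have hlen : (pvIdx pre "O").length = pvCntO pre := pvIdx_len pre "O"
  have hlek : pvCntO pre ≤ pre.length := List.countP_le_length
  have hfilt : ((pvIdx pre "O") ++ (pvIdx post "O").map (· + ((pre.length : Int) + 1))).filter
        (fun x => decide (x < (pre.length : Int))) = pvIdx pre "O" := by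
    rw [List.filter_append]
    have h1 : (pvIdx pre "O").filter (fun x => decide (x < (pre.length : Int))) = pvIdx pre "O" :=
      List.filter_eq_self.mpr (fun x hx => by simpa using (hbpre x hx).2)
    have h2 : ((pvIdx post "O").map (· + ((pre.length : Int) + 1))).filter
        (fun x => decide (x < (pre.length : Int))) = [] := by
      apply List.filter_eq_nil_iff.mpr
      intro x hx
      simp only [List.mem_map] at hx
      obtain ⟨y, hy, rfl⟩ := hx
      have := (hbpost y hy).1
      simp
      omega
    rw [h1, h2, List.append_nil]
  have hstep : pvStep ((pvIdx pre "O") ++ (pvIdx post "O").map (· + ((pre.length : Int) + 1)), [])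
        (pre.length : Int)
      = ((pvIdx post "O").map (· + ((pre.length : Int) + 1)),
         List.replicate (pvCntO pre) "O" ++ List.replicate (pre.length - pvCntO pre) "." ++ ["#"]) := by
    simp only [pvStep, hfilt, List.nil_append, map_const_O, pvPad_eq, remove_prefix]
    congr 1
    rw [hlen]
    have hexp : ((pre.length : Int) - (((List.replicate (pvCntO pre) "O").length : Nat) : Int)).toNat
        = pre.length - pvCntO pre := by simp only [List.length_replicate]; omega
    rw [hexp]
  have hret0 : (((List.replicate (pvCntO pre) "O" ++ List.replicate (pre.length - pvCntO pre) "."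
        ++ ["#"]).length : Nat) : Int) = (pre.length : Int) + 1 := by
    simp
    omega
  simp only [move_left, hO, hS, List.foldl_cons, hstep, List.length_append, List.length_cons]
  rw [show List.replicate (pvCntO pre) "O" ++ List.replicate (pre.length - pvCntO pre) "." ++ ["#"]
      = (List.replicate (pvCntO pre) "O" ++ List.replicate (pre.length - pvCntO pre) "." ++ ["#"])
        ++ ([] : List String) from (List.append_nil _).symm,
    foldl_step_shift ((pre.length : Int) + 1) (pvIdx post "#") (pvIdx post "O") _ [] hret0]
  set F := (pvIdx post "#").foldl pvStep (pvIdx post "O", []) with hF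
  rw [map_const_O, map_const_O, List.length_map, pvPad_eq, pvPad_eq]
  simp only [List.append_nil, List.append_assoc, List.singleton_append, List.length_append,
    List.length_replicate, List.length_map, List.length_cons, List.length_nil]
  have hE : ((pre.length + (post.length + 1) : Nat) -
        ((pvCntO pre + (pre.length - pvCntO pre + (F.2.length + 1 + F.1.length)) : Nat) : Int)).toNat
      = ((post.length : Int) - ((F.2.length + F.1.length : Nat) : Int)).toNat := by omega
  rw [hE]
  simp [List.cons_append, List.append_assoc]

theorem B_fold_shift (c : List String) :
    ∀ (ret0 ret : List String) (cnt seg : Nat),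
      c.foldl pvSegB (ret0 ++ ret, cnt, seg)
        = (ret0 ++ (c.foldl pvSegB (ret, cnt, seg)).1,
           (c.foldl pvSegB (ret, cnt, seg)).2) := by
  induction c with
  | nil => intro ret0 ret cnt seg; rfl
  | cons x c ih =>
      intro ret0 ret cnt seg
      simp only [List.foldl_cons, pvSegB]
      cases hx : (x == "#") <;> simp only [hx, if_pos, if_neg, Bool.false_eq_true,
        not_false_iff, ite_true, ite_false]
      · exact ih ret0 ret _ _
      · have e : ret0 ++ ret ++ List.replicate cnt "O" ++ List.replicate (seg - cnt) "." ++ ["#"]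
            = ret0 ++ (ret ++ List.replicate cnt "O" ++ List.replicate (seg - cnt) "." ++ ["#"]) := by
          simp [List.append_assoc]
        rw [e]
        exact ih ret0 _ 0 0

theorem B_nohash_fold (pre : List String) (h : "#" ∉ pre) :
    ∀ (ret : List String) (cnt seg : Nat),
      pre.foldl pvSegB (ret, cnt, seg) = (ret, cnt + pvCntO pre, seg + pre.length) := by
  induction pre with
  | nil => intro ret cnt seg; simp [pvCntO]
  | cons x pre ih =>
      simp only [List.mem_cons, not_or] at h
      have hx : (x == "#") = false := by
        simp only [beq_eq_false_iff_ne, ne_eq]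
        exact fun hh => h.1 (hh ▸ rfl)
      intro ret cnt seg
      simp only [List.foldl_cons, pvSegB, hx, Bool.false_eq_true, if_neg, not_false_iff,
        ite_false]
      rw [ih h.2]
      simp only [pvCntO, List.countP_cons, List.length_cons]
      cases hxo : (x == "O") <;> simp [hxo] <;> omega

theorem B_nohash (c : List String) (h : "#" ∉ c) :
    move_left_alt c
      = List.replicate (pvCntO c) "O" ++ List.replicate (c.length - pvCntO c) "." := by
  simp only [move_left_alt, B_nohash_fold c h [] 0 0, Nat.zero_add]
  simp

theorem B_split (pre post : List String) (h : "#" ∉ pre) :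
    move_left_alt (pre ++ "#" :: post)
      = List.replicate (pvCntO pre) "O" ++ List.replicate (pre.length - pvCntO pre) "."
        ++ ["#"] ++ move_left_alt post := by
  simp only [move_left_alt, List.foldl_append, List.foldl_cons,
    B_nohash_fold pre h [] 0 0, Nat.zero_add]
  simp only [pvSegB, beq_self_eq_true, ite_true, List.nil_append]
  rw [show List.replicate (pvCntO pre) "O" ++ List.replicate (pre.length - pvCntO pre) "." ++ ["#"]
      = (List.replicate (pvCntO pre) "O" ++ (List.replicate (pre.length - pvCntO pre) "." ++ ["#"]))
        ++ ([] : List String) by simp [List.append_assoc]]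
  rw [B_fold_shift post]
  simp [List.append_assoc]

theorem exists_split (c : List String) (h : "#" ∈ c) :
    ∃ pre post, c = pre ++ "#" :: post ∧ "#" ∉ pre := by
  induction c with
  | nil => simp at h
  | cons a c ih =>
      by_cases ha : a = "#"
      · exact ⟨[], c, by simp [ha], by simp⟩
      · have hc : "#" ∈ c := by
          rcases List.mem_cons.mp h with h1 | h1
          · exact absurd h1.symm ha
          · exact h1
        obtain ⟨pre, post, hsplit, hmem⟩ := ih hc
        exact ⟨a :: pre, post, by simp [hsplit], by simp [hmem]; exact fun hh => ha hh.symm⟩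

theorem main_eq : ∀ (n : Nat) (c : List String), c.length ≤ n → move_left c = move_left_alt c := by
  intro n
  induction n with
  | zero =>
      intro c hc
      have : c = [] := List.length_eq_zero_iff.mp (Nat.le_zero.mp hc)
      subst this
      simp [move_left, move_left_alt, pvIdx_nil, pvPad_eq]
  | succ n ih =>
      intro c hc
      by_cases h : "#" ∈ c
      · obtain ⟨pre, post, rfl, hmem⟩ := exists_split c h
        rw [A_split pre post hmem, B_split pre post hmem, ih post]
        simp only [List.length_append, List.length_cons] at hc
        omega
      · rw [A_nohash c h, B_nohash c h]

-- ===== VERDICT (by name: the statement is the Claim_ definition above) =====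
theorem move_left_spec : Claim_equal_move_left := by
  intro c _
  unfold Spec_move_left
  exact main_eq c.length c le_rfl
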